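-- pv_equiv track=rewrite | github.com/ehooo/django_mqtt | django_mqtt/protocol.py | remaining2list
-- ===== SOURCE A (Python) =====
-- def remaining2list(remain, exception=False):
--     bytes_remain = []
--     if not exception:
--         if remain is None:
--             return bytes_remain
--         elif remain < 0:
--             return bytes_remain
--     else:
--         if remain is None:
--             raise TypeError('None not allowed')
--         elif remain < 0:
--             raise ValueError('remain must positive')
--     dec = int(remain)
--     if dec == 0:
--         bytes_remain.append(0)
--     while dec > 0:
--         _enc = int(dec % 128)
--         dec = int(dec / 128)
--         if dec > 0:
--             _enc = int(_enc | 128)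
--         bytes_remain.append(_enc)
--     return bytes_remain
-- ===== SOURCE B (Python) =====
-- def remaining2list(remain, exception=False):
--     # guard clauses (same behaviour as A, including the raises)
--     if remain is None:
--         if exception:
--             raise TypeError('None not allowed')
--         return []
--     if remain < 0:
--         if exception:
--             raise ValueError('remain must positive')
--         return []
--     n = int(remain)
--     # number of base-128 digits of n (at least 1): smallest k >= 1 with n < 128**k
--     k = 1
--     while 128 ** k <= n:
--         k += 1
--     # each byte computed independently by positional arithmetic; continuation
--     # bit (+128) on every position except the most significant
--     return [(n // 128 ** i) % 128 + (128 if i < k - 1 else 0) for i in range(k)]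
-- ===== Notes on version B (the rewrite author's own statement) =====
-- stated objective: alternative
-- what changed: Replaces A's sequential while-loop over a running quotient (with the continuation bit decided mid-loop by peeking at the next quotient) by first computing the digit count k from powers of 128 and then building each byte independently by positional arithmetic (n // 128**i) % 128, marking every position but the last; guard clauses kept verbatim.
import Mathlib
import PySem

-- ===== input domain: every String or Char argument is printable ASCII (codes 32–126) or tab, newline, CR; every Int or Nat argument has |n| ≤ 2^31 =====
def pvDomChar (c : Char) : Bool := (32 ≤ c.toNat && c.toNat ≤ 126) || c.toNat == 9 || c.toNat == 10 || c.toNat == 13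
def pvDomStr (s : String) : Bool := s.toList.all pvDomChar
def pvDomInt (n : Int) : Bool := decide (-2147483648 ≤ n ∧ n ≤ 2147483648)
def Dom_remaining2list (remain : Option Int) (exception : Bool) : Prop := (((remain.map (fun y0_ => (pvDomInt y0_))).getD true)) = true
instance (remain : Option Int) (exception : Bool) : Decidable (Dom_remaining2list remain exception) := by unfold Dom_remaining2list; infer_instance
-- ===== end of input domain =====

-- B replaces A's sequential while-loop over a running quotient (continuation bit decided
-- mid-loop) by computing the digit count k first and then building each byte independently
-- by positional arithmetic (n // 128^i) % 128 (+128 on all but the last position).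
-- Objective: alternative. Where the Python A raises (exception=True with None/negative
-- remain) B raises identically; those inputs are excluded by Pre_remaining2list.


-- termination helper for A's digit loop (cited in decreasing_by)
theorem pvFloordiv128_toNat_lt (d : Int) (h : 0 < d) :
    (PySem.Int.floordiv d 128).toNat < d.toNat := by
  have h1 : PySem.Int.floordiv d 128 = d / 128 :=
    PySem.Int.floordiv_eq_ediv_of_pos (by norm_num)
  rw [h1]
  omega

-- termination helper for B's length loop (cited in decreasing_by): k < 128^k
theorem pvLt_pow128 (k : Nat) : (k : Int) < 128 ^ k := by
  have h2 : k < 2 ^ k := Nat.lt_two_pow_self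
  have h3 : 2 ^ k ≤ 128 ^ k := Nat.pow_le_pow_left (by norm_num) k
  have : (k : Nat) < 128 ^ k := lt_of_lt_of_le h2 h3
  exact_mod_cast this

-- ===== PORT A =====
-- A's while loop: dec is the remaining value, acc the bytes accumulated so far.
-- int(dec / 128) (float division in Python) equals floor division for 0 ≤ dec ≤ 2^31 (Dom).
def remAWhile (dec : Int) (acc : List Int) : List Int :=
  if h : 0 < dec then
    let e := PySem.Int.mod dec 128
    let dec' := PySem.Int.floordiv dec 128
    let e' := if 0 < dec' then Int.lor e 128 else e
    remAWhile dec' (acc ++ [e'])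
  else acc
termination_by dec.toNat
decreasing_by exact pvFloordiv128_toNat_lt dec h

def remaining2list (remain : Option Int) (exception : Bool) : List Int :=
  match remain with
  | none => []          -- with exception=True Python raises TypeError here: outside Pre_
  | some r =>
    if r < 0 then []    -- with exception=True Python raises ValueError here: outside Pre_
    else
      let init := if r = 0 then [0] else []
      remAWhile r init

-- ===== PORT B =====
-- B's length loop: smallest k ≥ (start) with n < 128^k
def remBLen (n : Int) (k : Nat) : Nat :=
  if h : (128 : Int) ^ k ≤ n then remBLen n (k + 1) else k
termination_by n.toNat - k
decreasing_by
  have hk : (k : Int) < n := lt_of_lt_of_le (pvLt_pow128 k) h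
  omega

-- [(n // 128 ** i) % 128 + (128 if i < k - 1 else 0) for i in range(k)]
def remBBytes (n : Int) (k : Nat) : List Int :=
  (List.range k).map (fun i =>
    PySem.Int.mod (PySem.Int.floordiv n ((128 : Int) ^ i)) 128
      + (if i < k - 1 then 128 else 0))

def remaining2list_alt (remain : Option Int) (exception : Bool) : List Int :=
  match remain with
  | none => []          -- with exception=True the Python B raises TypeError: outside Pre_
  | some r =>
    if r < 0 then []    -- with exception=True the Python B raises ValueError: outside Pre_
    else
      remBBytes r (remBLen r 1)

-- ===== PRECONDITION & SPEC =====
-- Pre_ excludes exactly the inputs where A (and B) raise: exception=True with remain None or negative.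
def Pre_remaining2list (remain : Option Int) (exception : Bool) : Prop :=
  exception = true → (match remain with | none => False | some r => 0 ≤ r)
instance (remain : Option Int) (exception : Bool) : Decidable (Pre_remaining2list remain exception) := by
  unfold Pre_remaining2list; cases remain <;> infer_instance

def pvWitness_remaining2list : Option Int × Bool := (some 321, true)

def Spec_remaining2list (remain : Option Int) (exception : Bool) (out : List Int) : Prop := out = remaining2list_alt remain exception
instance (remain : Option Int) (exception : Bool) (out : List Int) : Decidable (Spec_remaining2list remain exception out) := by unfold Spec_remaining2list; infer_instance

-- ===== CLAIM (what is proved, stated in full; the proofs are below) =====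
def Claim_equal_remaining2list : Prop := ∀ (remain : Option Int) (exception : Bool), Dom_remaining2list remain exception → Pre_remaining2list remain exception → Spec_remaining2list remain exception (remaining2list remain exception)

-- ===== LEMMAS AND PROOFS =====

theorem remBLen_small {n : Int} (k : Nat) (h : n < 128 ^ k) : remBLen n k = k := by
  rw [remBLen]; simp [not_le.mpr h]

theorem remBLen_ge (n : Int) (k : Nat) : k ≤ remBLen n k := by
  rw [remBLen]
  split
  · exact le_trans (Nat.le_succ k) (remBLen_ge n (k + 1))
  · exact le_rfl
termination_by n.toNat - k
decreasing_by
  have hk : (k : Int) < n := lt_of_lt_of_le (pvLt_pow128 k) (by assumption)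
  omega

-- shifting off a digit: remBLen n (j+1) = remBLen (n/128) j + 1, for n ≥ 0
theorem remBLen_shift (n : Int) (hn : 0 ≤ n) (j : Nat) :
    remBLen n (j + 1) = remBLen (n / 128) j + 1 := by
  have hiff : ((128 : Int) ^ (j + 1) ≤ n) ↔ ((128 : Int) ^ j ≤ n / 128) := by
    rw [Int.le_ediv_iff_mul_le (by norm_num : (0:Int) < 128)]
    rw [pow_succ]
  conv_lhs => rw [remBLen]
  conv_rhs => rw [remBLen]
  by_cases h : (128 : Int) ^ (j + 1) ≤ n
  · rw [dif_pos h, dif_pos (hiff.mp h)]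
    exact remBLen_shift n hn (j + 1)
  · rw [dif_neg h, dif_neg (fun h' => h (hiff.mpr h'))]
termination_by n.toNat - j
decreasing_by
  have hk : ((j + 1 : Nat) : Int) < n := lt_of_lt_of_le (pvLt_pow128 (j + 1)) (by assumption)
  omega

-- lor with 128 is + 128 on a base-128 digit
theorem lor_128_eq_add {d : Int} (h0 : 0 ≤ d) (h1 : d < 128) : Int.lor d 128 = d + 128 := by
  interval_cases d <;> decide

-- invariant of A's while loop, phrased against B's closed form
theorem remAWhile_eq (n : Int) (acc : List Int) (h : 0 < n) :
    remAWhile n acc = acc ++ remBBytes n (remBLen n 1) := by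
  have hfd : PySem.Int.floordiv n 128 = n / 128 :=
    PySem.Int.floordiv_eq_ediv_of_pos (by norm_num)
  have hmd : PySem.Int.mod n 128 = n % 128 :=
    PySem.Int.mod_eq_emod_of_pos (by norm_num)
  by_cases hs : n < 128
  · -- one digit
    have hL : remBLen n 1 = 1 := remBLen_small 1 (by simpa using hs)
    have hq : n / 128 = 0 := Int.ediv_eq_zero_of_lt (le_of_lt h) hs
    have hb : remBBytes n 1 = [n] := by
      simp only [remBBytes, List.range_one, List.map_cons, List.map_nil]
      rw [PySem.Int.floordiv_eq_ediv_of_pos (by norm_num), pow_zero, Int.ediv_one,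
        PySem.Int.mod_eq_emod_of_pos (by norm_num), Int.emod_eq_of_lt (le_of_lt h) hs]
      norm_num
    rw [hL, hb, remAWhile, dif_pos h]
    simp only [hfd, hq]
    rw [remAWhile]
    norm_num [hmd, Int.emod_eq_of_lt (le_of_lt h) hs]
  · -- n ≥ 128: peel one digit, recurse on m = n / 128
    have hs' : (128 : Int) ≤ n := by omega
    have hm : 0 < n / 128 := by
      have h1 : (1 : Int) ≤ n / 128 :=
        (Int.le_ediv_iff_mul_le (by norm_num)).mpr (by omega)
      omega
    have hL : remBLen n 1 = remBLen (n / 128) 1 + 1 := by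
      have h1 : remBLen n 1 = remBLen (n / 128) 0 + 1 := remBLen_shift n (le_of_lt h) 0
      have h0 : remBLen (n / 128) 0 = remBLen (n / 128) 1 := by
        rw [remBLen]
        rw [dif_pos (show (128 : Int) ^ 0 ≤ n / 128 by simp only [pow_zero]; omega)]
      rw [h1, h0]
    have hKm : 1 ≤ remBLen (n / 128) 1 := remBLen_ge _ 1
    rw [remAWhile, dif_pos h]
    simp only [hfd, hmd, if_pos hm]
    rw [remAWhile_eq (n / 128) _ hm]
    rw [List.append_assoc]
    congr 1
    -- [ (n%128)|128 ] ++ remBBytes (n/128) Km = remBBytes n (Km+1)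
    rw [hL]
    have hsplit : remBBytes n (remBLen (n / 128) 1 + 1)
        = Int.lor (n % 128) 128 :: remBBytes (n / 128) (remBLen (n / 128) 1) := by
      rw [remBBytes, List.range_succ_eq_map, List.map_cons, List.map_map]
      congr 1
      · -- head
        have hmark : (0 : Nat) < remBLen (n / 128) 1 + 1 - 1 := by omega
        simp only [if_pos hmark, pow_zero]
        rw [PySem.Int.floordiv_eq_ediv_of_pos (by norm_num), Int.ediv_one,
          PySem.Int.mod_eq_emod_of_pos (by norm_num)]
        exact (lor_128_eq_add (Int.emod_nonneg n (by norm_num))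
          (Int.emod_lt_of_pos n (by norm_num))).symm
      · -- tail
        conv_rhs => rw [remBBytes]
        apply List.map_congr_left
        intro i hi
        simp only [Function.comp_apply, Nat.succ_eq_add_one]
        have hsh : PySem.Int.floordiv n ((128 : Int) ^ (i + 1))
            = PySem.Int.floordiv (n / 128) ((128 : Int) ^ i) := by
          rw [PySem.Int.floordiv_eq_ediv_of_pos (by positivity),
            PySem.Int.floordiv_eq_ediv_of_pos (by positivity)]
          rw [pow_succ']
          rw [Int.ediv_ediv_of_nonneg (by norm_num : (0:Int) ≤ 128)]
        rw [hsh]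
        have hcond : (i + 1 < remBLen (n / 128) 1 + 1 - 1) ↔ (i < remBLen (n / 128) 1 - 1) := by
          omega
        by_cases hc : i < remBLen (n / 128) 1 - 1
        · rw [if_pos (hcond.mpr hc), if_pos hc]
        · rw [if_neg (fun h' => hc (hcond.mp h')), if_neg hc]
    rw [hsplit, List.singleton_append]
termination_by n.toNat
decreasing_by
  have := pvFloordiv128_toNat_lt n h
  rw [PySem.Int.floordiv_eq_ediv_of_pos (by norm_num)] at this
  exact this

-- ===== VERDICT (by name: the statement is the Claim_ definition above) =====
theorem remaining2list_spec : Claim_equal_remaining2list := by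
  intro remain exception _ _
  unfold Spec_remaining2list remaining2list remaining2list_alt
  cases remain with
  | none => rfl
  | some r =>
    by_cases hn : r < 0
    · simp [hn]
    · simp only [hn, if_false]
      by_cases h0 : r = 0
      · subst h0
        rw [remAWhile]
        rw [remBLen_small 1 (by norm_num)]
        simp [remBBytes, List.range_one, PySem.Int.floordiv_eq_ediv_of_pos,
          PySem.Int.mod_eq_emod_of_pos]
      · have hp : 0 < r := by omega
        rw [remAWhile_eq r _ hp]
        simp [h0]
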